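-- pv_equiv track=rewrite | github.com/dogfew/python | algorithms/amd.py | all_possible_combinations
-- ===== SOURCE A (Python) =====
-- def all_possible_combinations(male_prefs, female_prefs, current_match={}):
--     males = list(male_prefs.keys())
--     females = list(female_prefs.keys())
--
--     if len(current_match) == len(males):
--         return [current_match.copy()]
--
--     current_male = males[len(current_match)]
--     possible_matches = []
--
--     for female in females + [None]:
--         if female is None or female not in current_match.values():
--             current_match[current_male] = female
--             possible_matches.extend(
--                 all_possible_combinations(male_prefs, female_prefs, current_match)
--             )
--             current_match.pop(current_male)
--
--     return possible_matches
-- ===== SOURCE B (Python) =====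
-- def all_possible_combinations(male_prefs, female_prefs, current_match={}):
--     males = list(male_prefs.keys())
--     females = list(female_prefs.keys())
--     partials = [dict(current_match)]
--     for male in males[len(current_match):]:
--         nxt = []
--         for p in partials:
--             for female in females + [None]:
--                 if female is None or female not in p.values():
--                     q = dict(p)
--                     q[male] = female
--                     nxt.append(q)
--         partials = nxt
--     return partials
-- ===== Notes on version B (the rewrite author's own statement) =====
-- stated objective: alternative
-- what changed: Replaces A's backtracking recursion (mutating one shared dict and popping after each branch) by an iterative layer-building loop that, for each remaining male, rebuilds the list of partial assignments by extending every partial with every admissible female-or-None, producing the same assignments in the same DFS-lexicographic order with no recursion.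
import Mathlib
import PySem

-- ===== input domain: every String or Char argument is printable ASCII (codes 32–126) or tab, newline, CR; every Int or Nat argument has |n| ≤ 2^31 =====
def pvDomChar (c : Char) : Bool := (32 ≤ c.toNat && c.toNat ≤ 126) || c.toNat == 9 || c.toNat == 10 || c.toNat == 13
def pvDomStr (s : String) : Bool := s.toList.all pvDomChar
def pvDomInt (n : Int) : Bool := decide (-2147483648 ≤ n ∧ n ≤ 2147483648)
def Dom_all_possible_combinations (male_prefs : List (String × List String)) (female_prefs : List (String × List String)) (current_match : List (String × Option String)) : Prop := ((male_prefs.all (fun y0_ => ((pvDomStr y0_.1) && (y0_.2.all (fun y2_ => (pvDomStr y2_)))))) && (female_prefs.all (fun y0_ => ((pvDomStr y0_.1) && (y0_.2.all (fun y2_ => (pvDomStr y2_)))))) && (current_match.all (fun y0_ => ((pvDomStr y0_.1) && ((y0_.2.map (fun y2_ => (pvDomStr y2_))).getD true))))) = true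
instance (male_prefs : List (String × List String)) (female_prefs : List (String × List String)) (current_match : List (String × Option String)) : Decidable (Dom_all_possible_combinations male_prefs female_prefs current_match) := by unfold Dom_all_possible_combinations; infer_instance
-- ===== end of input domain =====

-- B replaces A's backtracking recursion by an iterative layer-building loop over the remaining males
-- (same return value in the same order; objective: alternative decomposition, no speed claim).
-- A mutates current_match during the recursion but restores it before returning; the equivalence here
-- is about the return value only (B does not mutate).


-- ===== PORT A =====
-- A's recursion, totalized by fuel: each recursive call inserts a fresh key (under Pre_), so
-- males.length + 1 units of fuel are never exhausted on Pre_ inputs; the 0-fuel and IndexError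
-- branches return [] and correspond exactly to A raising (excluded by Pre_).
def apcRec (males : List String) (fs : List (Option String)) : Nat → PySem.Dict String (Option String) → List (List (String × Option String))
  | 0, _ => []
  | fuel + 1, cm =>
    if cm.size = males.length then [cm.items]          -- return [current_match.copy()]
    else
      match PySem.List.pyGet? males ((cm.size : Int)) with   -- males[len(current_match)]
      | none => []                                      -- IndexError (outside Pre_)
      | some m =>
        -- for female in females + [None]: if female is None or female not in current_match.values(): …
        fs.foldl (fun acc f =>
          if f = none ∨ ¬ f ∈ cm.values then
            acc ++ apcRec males fs fuel (cm.insert m f)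
          else acc) []

def all_possible_combinations (male_prefs : List (String × List String)) (female_prefs : List (String × List String)) (current_match : List (String × Option String)) : List (List (String × Option String)) :=
  let males := (PySem.Dict.ofList male_prefs).keys
  let fs := ((PySem.Dict.ofList female_prefs).keys.map some) ++ [none]   -- females + [None]
  let d := PySem.Dict.ofList current_match
  apcRec males fs (males.length + 1) d

-- ===== PORT B =====
-- inner loop body of Source B: for female in females + [None]: if ok: nxt.append(p | {male: female})
def apcExtOn (fs : List (Option String)) (m : String) (p : PySem.Dict String (Option String)) (nxt : List (PySem.Dict String (Option String))) : List (PySem.Dict String (Option String)) :=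
  fs.foldl (fun acc f => if f = none ∨ ¬ f ∈ p.values then acc ++ [p.insert m f] else acc) nxt

-- middle loop: for p in partials: …
def apcLayer (fs : List (Option String)) (m : String) (parts : List (PySem.Dict String (Option String))) : List (PySem.Dict String (Option String)) :=
  parts.foldl (fun nxt p => apcExtOn fs m p nxt) []

def all_possible_combinations_alt (male_prefs : List (String × List String)) (female_prefs : List (String × List String)) (current_match : List (String × Option String)) : List (List (String × Option String)) :=
  let males := (PySem.Dict.ofList male_prefs).keys
  let fs := ((PySem.Dict.ofList female_prefs).keys.map some) ++ [none]
  let d := PySem.Dict.ofList current_match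
  -- males[len(current_match):] with a nonnegative start index is List.drop
  ((males.drop d.size).foldl (fun parts m => apcLayer fs m parts) [d]).map PySem.Dict.items

-- ===== PRECONDITION & SPEC =====
-- Pre_: exactly the inputs where the Python A returns: current_match is no larger than the male list
-- (else IndexError) and no male at or after position len(current_match) is already a key of
-- current_match (else the same male is re-chosen forever: RecursionError).
def Pre_all_possible_combinations (male_prefs : List (String × List String)) (female_prefs : List (String × List String)) (current_match : List (String × Option String)) : Prop :=
  let males := (PySem.Dict.ofList male_prefs).keys
  let d := PySem.Dict.ofList current_match
  d.size ≤ males.length ∧ ∀ k ∈ males.drop d.size, d.contains k = false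
instance (male_prefs : List (String × List String)) (female_prefs : List (String × List String)) (current_match : List (String × Option String)) : Decidable (Pre_all_possible_combinations male_prefs female_prefs current_match) := by unfold Pre_all_possible_combinations; infer_instance

def pvWitness_all_possible_combinations : (List (String × List String)) × (List (String × List String)) × (List (String × Option String)) :=
  ([("a", ["x"]), ("b", [])], ([("x", []), ("y", [])], [("a", some "x")]))

def Spec_all_possible_combinations (male_prefs : List (String × List String)) (female_prefs : List (String × List String)) (current_match : List (String × Option String)) (out : List (List (String × Option String))) : Prop := out = all_possible_combinations_alt male_prefs female_prefs current_match
instance (male_prefs : List (String × List String)) (female_prefs : List (String × List String)) (current_match : List (String × Option String)) (out : List (List (String × Option String))) : Decidable (Spec_all_possible_combinations male_prefs female_prefs current_match out) := by unfold Spec_all_possible_combinations; infer_instance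

-- ===== CLAIM (what is proved, stated in full; the proofs are below) =====
def Claim_equal_all_possible_combinations : Prop := ∀ (male_prefs : List (String × List String)) (female_prefs : List (String × List String)) (current_match : List (String × Option String)), Dom_all_possible_combinations male_prefs female_prefs current_match → Pre_all_possible_combinations male_prefs female_prefs current_match → Spec_all_possible_combinations male_prefs female_prefs current_match (all_possible_combinations male_prefs female_prefs current_match)

-- ===== LEMMAS AND PROOFS =====

-- B's outer loop as a named function (over any starting list of partials)
def apcLayers (fs : List (Option String)) (rest : List String) (parts : List (PySem.Dict String (Option String))) : List (PySem.Dict String (Option String)) :=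
  rest.foldl (fun parts m => apcLayer fs m parts) parts

-- one extension step, as filter-then-map
theorem apcExtOn_eq (fs : List (Option String)) (m : String) (p : PySem.Dict String (Option String)) (nxt : List (PySem.Dict String (Option String))) :
    apcExtOn fs m p nxt = nxt ++ (fs.filter (fun f => decide (f = none ∨ ¬ f ∈ p.values))).map (fun f => p.insert m f) := by
  simpa [apcExtOn] using PySem.List.foldl_append_ite (l := fs) (acc := nxt)
    (p := fun f => f = none ∨ ¬ f ∈ p.values) (f := fun f => p.insert m f)

theorem apcLayer_eq_flatMap (fs : List (Option String)) (m : String) (parts : List (PySem.Dict String (Option String))) :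
    apcLayer fs m parts = parts.flatMap (fun p => apcExtOn fs m p []) := by
  unfold apcLayer
  refine (PySem.List.foldl_congr_mem parts (fun nxt p => apcExtOn fs m p nxt)
      (fun nxt p => nxt ++ apcExtOn fs m p []) []
      (fun acc p _ => by dsimp only; rw [apcExtOn_eq, apcExtOn_eq]; simp)).trans ?_
  simpa using PySem.List.foldl_append_eq_flatMap (l := parts) (acc := []) (g := fun p => apcExtOn fs m p [])

theorem apcLayers_flat (fs : List (Option String)) (rest : List String) (parts : List (PySem.Dict String (Option String))) :
    apcLayers fs rest parts = parts.flatMap (fun p => apcLayers fs rest [p]) := by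
  induction rest generalizing parts with
  | nil => simp [apcLayers]
  | cons m rest ih =>
      show apcLayers fs rest (apcLayer fs m parts) = _
      rw [ih, apcLayer_eq_flatMap, List.flatMap_assoc]
      refine List.flatMap_congr ?_; intro p _
      show _ = apcLayers fs rest (apcLayer fs m [p])
      rw [ih (apcLayer fs m [p]), apcLayer_eq_flatMap]
      simp

-- flatMap over a filtered list, as a flatMap with an if (glue for the two loop shapes)
theorem apcFlatMapFilter {α β : Type} (p : α → Prop) [DecidablePred p] (g : α → List β) (l : List α) :
    (l.filter (fun x => decide (p x))).flatMap g = l.flatMap (fun x => if p x then g x else []) := by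
  induction l with
  | nil => simp
  | cons x l ih => by_cases h : p x <;> simp [h, ih]

-- main correspondence: A's DFS over males = pre ++ rest equals B's layer loop over rest
theorem apc_dfs_eq (fs : List (Option String)) :
    ∀ (rest pre : List String) (d : PySem.Dict String (Option String)) (fuel : Nat),
      d.size = pre.length →
      (∀ k ∈ rest, d.contains k = false) →
      rest.Nodup →
      rest.length < fuel →
      apcRec (pre ++ rest) fs fuel d = (apcLayers fs rest [d]).map PySem.Dict.items := by
  intro rest
  induction rest with
  | nil =>
      intro pre d fuel hsz _ _ hfuel
      obtain ⟨f, rfl⟩ : ∃ f, fuel = f + 1 := ⟨fuel - 1, by omega⟩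
      simp [apcRec, apcLayers, hsz]
  | cons m rest ih =>
      intro pre d fuel hsz hfresh hnd hfuel
      obtain ⟨f, rfl⟩ : ∃ f, fuel = f + 1 := ⟨fuel - 1, by omega⟩
      have hne : d.size ≠ (pre ++ m :: rest).length := by
        simp only [List.length_append, List.length_cons, hsz]; omega
      have hget : PySem.List.pyGet? (pre ++ m :: rest) ((d.size : Int)) = some m := by
        rw [hsz]; exact PySem.List.pyGet?_append_length pre rest m
      have hmc : d.contains m = false := hfresh m (by simp)
      -- A's female loop as a flatMap
      have hA : apcRec (pre ++ m :: rest) fs (f + 1) d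
          = fs.flatMap (fun x => if x = none ∨ ¬ x ∈ d.values then apcRec (pre ++ m :: rest) fs f (d.insert m x) else []) := by
        rw [apcRec, if_neg hne, hget]
        refine (PySem.List.foldl_congr_mem fs
            (fun acc x => if x = none ∨ ¬ x ∈ d.values then acc ++ apcRec (pre ++ m :: rest) fs f (d.insert m x) else acc)
            (fun acc x => acc ++ (if x = none ∨ ¬ x ∈ d.values then apcRec (pre ++ m :: rest) fs f (d.insert m x) else [])) []
            (fun acc x _ => by dsimp only; split <;> simp)).trans ?_
        simpa using PySem.List.foldl_append_eq_flatMap (l := fs) (acc := [])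
          (g := fun x => if x = none ∨ ¬ x ∈ d.values then apcRec (pre ++ m :: rest) fs f (d.insert m x) else [])
      rw [hA]
      -- B's side
      have hB : apcLayers fs (m :: rest) [d]
          = fs.flatMap (fun x => if x = none ∨ ¬ x ∈ d.values then apcLayers fs rest [d.insert m x] else []) := by
        show apcLayers fs rest (apcLayer fs m [d]) = _
        rw [apcLayer_eq_flatMap]
        simp only [List.flatMap_cons, List.flatMap_nil, List.append_nil]
        rw [apcExtOn_eq]
        simp only [List.nil_append]
        rw [apcLayers_flat, List.flatMap_map, apcFlatMapFilter]
      rw [hB, List.map_flatMap]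
      refine List.flatMap_congr ?_; intro x _
      by_cases h : x = none ∨ ¬ x ∈ d.values
      · simp only [h, if_true]
        have hsz' : (d.insert m x).size = (pre ++ [m]).length := by
          rw [PySem.Dict.size_insert]; simp [hmc, hsz]
        have := ih (pre ++ [m]) (d.insert m x) f hsz'
          (by intro k hk
              rw [PySem.Dict.contains_insert]
              have hkm : k ≠ m := by rintro rfl; exact (List.nodup_cons.mp hnd).1 hk
              simp [hkm, hfresh k (List.mem_cons_of_mem _ hk)])
          ((List.nodup_cons.mp hnd).2) (by simp at hfuel ⊢; omega)
        rw [← this]; congr 1; simp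
      · simp [h]

-- ===== VERDICT (by name: the statement is the Claim_ definition above) =====
theorem all_possible_combinations_spec : Claim_equal_all_possible_combinations := by
  intro mp fp cm _ hpre
  obtain ⟨hle, hfresh⟩ := hpre
  show all_possible_combinations mp fp cm = all_possible_combinations_alt mp fp cm
  unfold all_possible_combinations all_possible_combinations_alt
  set males := (PySem.Dict.ofList mp).keys with hmales
  set fs := ((PySem.Dict.ofList fp).keys.map some) ++ [(none : Option String)]
  set d := PySem.Dict.ofList cm with hd
  have hsplit : males = males.take d.size ++ males.drop d.size := (List.take_append_drop _ _).symm
  have hnd : males.Nodup := PySem.Dict.nodup_keys_ofList mp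
  have := apc_dfs_eq fs (males.drop d.size) (males.take d.size) d (males.length + 1)
    (by simp only [List.length_take]; omega)
    hfresh
    (hnd.sublist (List.drop_sublist _ _))
    (by simp only [List.length_drop]; omega)
  calc apcRec males fs (males.length + 1) d
      = apcRec (males.take d.size ++ males.drop d.size) fs (males.length + 1) d := by rw [← hsplit]
    _ = (apcLayers fs (males.drop d.size) [d]).map PySem.Dict.items := this
    _ = ((males.drop d.size).foldl (fun parts m => apcLayer fs m parts) [d]).map PySem.Dict.items := rfl
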